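-- pv_equiv track=rewrite | github.com/bob686868/Leetcode-100-day-challenge- | day6.py | numSubarraysOfSizeKAndAvGreaterThenThreshold
-- ===== SOURCE A (Python) =====
-- def numSubarraysOfSizeKAndAvGreaterThenThreshold(nums,k,threshold):
--
--     windowSum=0
--     target=k*threshold
--     result=0
--     for i in range(k):
--         windowSum+=nums[i]
--
--     if windowSum >= target:
--         result+=1
--
--     for i in range(k,len(nums)):
--         windowSum-=nums[i-k]
--         windowSum+=nums[i]
--         if windowSum>=target:
--             result+=1
--     return result
-- ===== SOURCE B (Python) =====
-- def numSubarraysOfSizeKAndAvGreaterThenThreshold(nums, k, threshold):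
--     prefix = [0]
--     s = 0
--     for x in nums:
--         s += x
--         prefix.append(s)
--     target = k * threshold
--     count = 0
--     for i in range(len(nums) - k + 1):
--         if prefix[i + k] - prefix[i] >= target:
--             count += 1
--     return count
-- ===== Notes on version B (the rewrite author's own statement) =====
-- stated objective: alternative
-- what changed: Replaces the incremental sliding-window accumulator with a prefix-sum table built in one pass and a second pass counting starts i with P[i+k]-P[i] >= k*threshold.
import Mathlib
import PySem

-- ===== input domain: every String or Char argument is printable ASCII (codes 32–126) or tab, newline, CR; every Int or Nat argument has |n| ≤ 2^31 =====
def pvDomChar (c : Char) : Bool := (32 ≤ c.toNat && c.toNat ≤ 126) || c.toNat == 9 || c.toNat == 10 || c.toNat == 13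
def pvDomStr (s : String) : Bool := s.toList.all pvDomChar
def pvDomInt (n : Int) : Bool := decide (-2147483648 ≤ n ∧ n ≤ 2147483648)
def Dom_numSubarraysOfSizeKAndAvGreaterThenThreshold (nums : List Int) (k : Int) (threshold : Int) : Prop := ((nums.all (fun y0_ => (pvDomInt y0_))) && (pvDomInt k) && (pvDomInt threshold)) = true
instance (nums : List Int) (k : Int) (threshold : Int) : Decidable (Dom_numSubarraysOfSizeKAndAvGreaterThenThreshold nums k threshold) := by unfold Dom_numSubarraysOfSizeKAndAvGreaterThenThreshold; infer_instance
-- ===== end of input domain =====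

-- B replaces A's incremental sliding-window accumulator with a prefix-sum table and a
-- counting pass over window start indices; equivalence is proved on 0 ≤ k ≤ len(nums)
-- (outside that A raises IndexError).

-- ===== PORT A =====
-- the body of A's second for-loop (carries the pair (windowSum, result))
def stepA (nums : List Int) (k target : Int) (p : Int × Int) (i : Int) : Int × Int :=
  let ws := p.1 - PySem.List.pyGetD nums (i - k) 0 + PySem.List.pyGetD nums i 0
  (ws, if ws ≥ target then p.2 + 1 else p.2)

def numSubarraysOfSizeKAndAvGreaterThenThreshold (nums : List Int) (k : Int) (threshold : Int) : Int :=
  -- nums[i] is ported as pyGetD nums i 0: Pre_ excludes the inputs where Python raises IndexError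
  let windowSum : Int := (PySem.List.pyRange 0 k 1).foldl
      (fun ws i => ws + PySem.List.pyGetD nums i 0) 0
  let target := k * threshold
  let result : Int := if windowSum ≥ target then 1 else 0
  let st := (PySem.List.pyRange k (PySem.List.len nums) 1).foldl (stepA nums k target)
      (windowSum, result)
  st.2

-- ===== PORT B =====
def numSubarraysOfSizeKAndAvGreaterThenThreshold_alt (nums : List Int) (k : Int) (threshold : Int) : Int :=
  -- state (s, prefix): 's += x; prefix.append(s)'
  let st := nums.foldl (fun (p : Int × List Int) x => (p.1 + x, p.2 ++ [p.1 + x])) (0, [0])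
  let pre := st.2
  let target := k * threshold
  (PySem.List.pyRange 0 (PySem.List.len nums - k + 1) 1).foldl
    (fun count i =>
      if PySem.List.pyGetD pre (i + k) 0 - PySem.List.pyGetD pre i 0 ≥ target
      then count + 1 else count) 0

-- ===== PRECONDITION & SPEC =====
-- Pre_ = exactly the inputs on which the Python A returns: A raises IndexError when k < 0
-- or k > len(nums) (its first loop indexes nums[0..k-1], the second nums[i-k] out of range).
def Pre_numSubarraysOfSizeKAndAvGreaterThenThreshold (nums : List Int) (k : Int) (threshold : Int) : Prop :=
  0 ≤ k ∧ k ≤ (nums.length : Int)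
instance (nums : List Int) (k : Int) (threshold : Int) : Decidable (Pre_numSubarraysOfSizeKAndAvGreaterThenThreshold nums k threshold) := by unfold Pre_numSubarraysOfSizeKAndAvGreaterThenThreshold; infer_instance

def pvWitness_numSubarraysOfSizeKAndAvGreaterThenThreshold : List Int × Int × Int := ([2, 2, 2, 4], 3, 2)

def Spec_numSubarraysOfSizeKAndAvGreaterThenThreshold (nums : List Int) (k : Int) (threshold : Int) (out : Int) : Prop := out = numSubarraysOfSizeKAndAvGreaterThenThreshold_alt nums k threshold
instance (nums : List Int) (k : Int) (threshold : Int) (out : Int) : Decidable (Spec_numSubarraysOfSizeKAndAvGreaterThenThreshold nums k threshold out) := by unfold Spec_numSubarraysOfSizeKAndAvGreaterThenThreshold; infer_instance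

-- ===== CLAIM (what is proved, stated in full; the proofs are below) =====
def Claim_equal_numSubarraysOfSizeKAndAvGreaterThenThreshold : Prop := ∀ (nums : List Int) (k : Int) (threshold : Int), Dom_numSubarraysOfSizeKAndAvGreaterThenThreshold nums k threshold → Pre_numSubarraysOfSizeKAndAvGreaterThenThreshold nums k threshold → Spec_numSubarraysOfSizeKAndAvGreaterThenThreshold nums k threshold (numSubarraysOfSizeKAndAvGreaterThenThreshold nums k threshold)

-- ===== LEMMAS AND PROOFS =====

-- P nums j = sum of the first j elements of nums
def pvP (nums : List Int) (j : Nat) : Int := (nums.take j).sum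

lemma pvP_zero (nums : List Int) : pvP nums 0 = 0 := by simp [pvP]

lemma pvP_succ (nums : List Int) (j : Nat) (h : j < nums.length) :
    pvP nums (j + 1) = pvP nums j + nums[j] := by
  exact List.sum_take_succ nums j h

lemma pvGet_nat (nums : List Int) (j : Nat) (h : j < nums.length) :
    PySem.List.pyGetD nums (j : Int) 0 = nums[j] := by
  rw [PySem.List.pyGetD_natCast]
  exact List.getD_eq_getElem nums 0 h

-- B's building loop produces the table of prefix sums
lemma pvBuild (nums : List Int) (s : Int) (pre : List Int) :
    nums.foldl (fun (p : Int × List Int) x => (p.1 + x, p.2 ++ [p.1 + x])) (s, pre)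
      = (s + nums.sum, pre ++ (List.range nums.length).map (fun i => s + (nums.take (i+1)).sum)) := by
  induction nums generalizing s pre with
  | nil => simp
  | cons a t ih =>
    rw [List.foldl_cons, ih]
    refine Prod.ext ?_ ?_
    · simp only [List.sum_cons]; ring
    · simp only [List.length_cons, List.range_succ_eq_map, List.map_cons, List.map_map]
      simp [List.take_succ_cons, Function.comp, add_assoc]

lemma pvPrefixList (nums : List Int) :
    (nums.foldl (fun (p : Int × List Int) x => (p.1 + x, p.2 ++ [p.1 + x])) (0, [0])).2
      = (List.range (nums.length + 1)).map (pvP nums) := by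
  rw [pvBuild]
  simp only [List.range_succ_eq_map, List.map_cons, List.map_map]
  simp [pvP, Function.comp]

lemma pvGetPrefix (nums : List Int) (j : Nat) (h : j ≤ nums.length) :
    PySem.List.pyGetD ((List.range (nums.length + 1)).map (pvP nums)) (j : Int) 0 = pvP nums j := by
  rw [PySem.List.pyGetD_natCast]
  rw [List.getD_eq_getElem _ _ (by simpa using Nat.lt_succ_of_le h)]
  simp

-- A's first loop computes the sum of the first m elements
lemma pvFirstLoop (nums : List Int) (m : Nat) (h : m ≤ nums.length) (c : Int) :
    (List.range m).foldl (fun acc (j : Nat) => acc + PySem.List.pyGetD nums (j : Int) 0) c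
      = c + pvP nums m := by
  induction m generalizing c with
  | zero => simp [pvP]
  | succ m ih =>
    rw [List.range_succ, List.foldl_append]
    rw [ih (le_of_lt (Nat.lt_of_succ_le h))]
    simp only [List.foldl_cons, List.foldl_nil]
    rw [pvGet_nat nums m (Nat.lt_of_succ_le h), pvP_succ nums m (Nat.lt_of_succ_le h)]
    ring

-- 0/1 indicator of the window starting at j qualifying
def pvG (nums : List Int) (k' : Nat) (target : Int) (j : Nat) : Int :=
  if target ≤ pvP nums (j + k') - pvP nums j then 1 else 0

-- A's second loop: invariant characterisation
lemma pvLoopA (nums : List Int) (k' : Nat) (target : Int) :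
    ∀ (d m : Nat) (r : Int), k' + m ≤ nums.length → d = nums.length - (k' + m) →
    ((PySem.List.pyRange ((k' : Int) + m) (nums.length : Int) 1).foldl
        (stepA nums (k' : Int) target)
        (pvP nums (k' + m) - pvP nums m, r)).2
      = r + ((List.range d).map (fun t => pvG nums k' target (m + 1 + t))).sum := by
  intro d
  induction d with
  | zero =>
    intro m r hle hd
    have : (k' : Int) + m = (nums.length : Int) := by omega
    rw [this, PySem.List.pyRange_one_eq_nil (le_refl _)]
    simp
  | succ d ih =>
    intro m r hle hd
    have hlt : k' + m < nums.length := by omega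
    have hcons : PySem.List.pyRange ((k' : Int) + m) (nums.length : Int) 1
        = ((k' : Int) + m) :: PySem.List.pyRange ((k' : Int) + m + 1) (nums.length : Int) 1 :=
      PySem.List.pyRange_one_cons (by exact_mod_cast hlt)
    rw [hcons, List.foldl_cons]
    have hm : m < nums.length := by omega
    have hws : (pvP nums (k' + m) - pvP nums m)
        - PySem.List.pyGetD nums (((k' : Int) + m) - (k' : Int)) 0
        + PySem.List.pyGetD nums ((k' : Int) + m) 0
        = pvP nums (k' + (m+1)) - pvP nums (m+1) := by
      have hsub : ((k' : Int) + m) - (k' : Int) = (m : Int) := by ring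
      rw [hsub, pvGet_nat nums m hm]
      have hc : ((k' : Int) + m) = ((k' + m : Nat) : Int) := by push_cast; ring
      rw [hc, pvGet_nat nums (k' + m) hlt]
      rw [pvP_succ nums m hm]
      have h2 : k' + (m + 1) = (k' + m) + 1 := by omega
      rw [h2, pvP_succ nums (k' + m) hlt]
      ring
    have hstep : stepA nums (k' : Int) target (pvP nums (k' + m) - pvP nums m, r) ((k' : Int) + m)
        = (pvP nums (k' + (m+1)) - pvP nums (m+1), r + pvG nums k' target (m + 1)) := by
      simp only [stepA, hws]
      have h3 : m + 1 + k' = k' + (m + 1) := by omega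
      simp only [pvG, h3, ge_iff_le]
      split_ifs <;> ring_nf
    rw [hstep]
    have hcast : (k' : Int) + m + 1 = ((k' : Int) + ((m + 1 : Nat) : Int)) := by push_cast; ring
    rw [hcast]
    rw [ih (m + 1) _ (by omega) (by omega)]
    rw [List.range_succ_eq_map, List.map_cons, List.map_map, List.sum_cons]
    have hmap : (List.range d).map ((fun t => pvG nums k' target (m + 1 + t)) ∘ Nat.succ)
        = (List.range d).map (fun t => pvG nums k' target (m + 1 + 1 + t)) := by
      refine List.map_congr_left ?_
      intro t _
      simp only [Function.comp]
      congr 1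
      omega
    rw [hmap]
    have h0 : m + 1 + 0 = m + 1 := by omega
    rw [h0]
    ring

-- A's second loop started at m = 0 (the form A's code uses)
lemma pvLoopA0 (nums : List Int) (k' : Nat) (target r : Int) (hle : k' ≤ nums.length) :
    ((PySem.List.pyRange (k' : Int) (nums.length : Int) 1).foldl
        (stepA nums (k' : Int) target) (pvP nums k', r)).2
      = r + ((List.range (nums.length - k')).map (fun t => pvG nums k' target (1 + t))).sum := by
  have h := pvLoopA nums k' target (nums.length - k') 0 r (by omega) (by omega)
  simpa [pvP_zero] using h

-- the common closed form of both programs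
lemma pvAclosed (nums : List Int) (threshold : Int) (k' : Nat) (hle : k' ≤ nums.length) :
    numSubarraysOfSizeKAndAvGreaterThenThreshold nums (k' : Int) threshold
      = ((List.range (nums.length - k' + 1)).map (pvG nums k' ((k' : Int) * threshold))).sum := by
  simp only [numSubarraysOfSizeKAndAvGreaterThenThreshold, PySem.List.len_eq]
  rw [PySem.List.pyRange_zero_natCast, List.foldl_map]
  rw [pvFirstLoop nums k' hle 0, zero_add]
  rw [pvLoopA0 nums k' ((k' : Int) * threshold) _ hle]
  rw [List.range_succ_eq_map, List.map_cons, List.map_map, List.sum_cons]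
  have hmap : (List.range (nums.length - k')).map ((pvG nums k' ((k' : Int) * threshold)) ∘ Nat.succ)
      = (List.range (nums.length - k')).map (fun t => pvG nums k' ((k' : Int) * threshold) (1 + t)) := by
    refine List.map_congr_left ?_
    intro t _
    simp only [Function.comp]
    congr 1
    omega
  rw [hmap]
  have hg0 : pvG nums k' ((k' : Int) * threshold) 0
      = if pvP nums k' ≥ (k' : Int) * threshold then (1 : Int) else 0 := by
    simp [pvG, pvP_zero, ge_iff_le]
  rw [hg0]

lemma pvBclosed (nums : List Int) (threshold : Int) (k' : Nat) (hle : k' ≤ nums.length) :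
    numSubarraysOfSizeKAndAvGreaterThenThreshold_alt nums (k' : Int) threshold
      = ((List.range (nums.length - k' + 1)).map (pvG nums k' ((k' : Int) * threshold))).sum := by
  simp only [numSubarraysOfSizeKAndAvGreaterThenThreshold_alt, PySem.List.len_eq]
  rw [pvPrefixList]
  have hbound : (nums.length : Int) - (k' : Int) + 1 = ((nums.length - k' + 1 : Nat) : Int) := by
    push_cast [Nat.cast_sub hle]; ring
  rw [hbound, PySem.List.pyRange_zero_natCast, List.foldl_map]
  rw [PySem.List.foldl_congr_mem _ _
      (fun (c : Int) (j : Nat) => c + pvG nums k' ((k' : Int) * threshold) j) _ ?_]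
  · rw [PySem.List.foldl_add, zero_add]
  · intro c j hj
    rw [List.mem_range] at hj
    have hjk : j + k' ≤ nums.length := by omega
    have hcast : (j : Int) + (k' : Int) = ((j + k' : Nat) : Int) := by push_cast; ring
    rw [hcast, pvGetPrefix nums (j + k') hjk, pvGetPrefix nums j (by omega)]
    simp only [pvG, ge_iff_le]
    split_ifs <;> ring

-- ===== VERDICT (by name: the statement is the Claim_ definition above) =====
theorem numSubarraysOfSizeKAndAvGreaterThenThreshold_spec : Claim_equal_numSubarraysOfSizeKAndAvGreaterThenThreshold := by
  intro nums k threshold _hdom hpre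
  obtain ⟨hk0, hkle⟩ := hpre
  have hk : k = ((k.toNat : Nat) : Int) := by omega
  have hle : k.toNat ≤ nums.length := by omega
  unfold Spec_numSubarraysOfSizeKAndAvGreaterThenThreshold
  rw [hk, pvAclosed nums threshold k.toNat hle, pvBclosed nums threshold k.toNat hle]
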